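-- pv_equiv track=rewrite | github.com/RossFW/GABM-Mobility-Curve | analysis/audit_models.py | count_by_sev
-- ===== SOURCE A (Python) =====
-- SE_WARN = 5      # noticeable instability
--
-- SE_SEVERE = 100  # coefficient essentially unidentified
--
-- def count_by_sev(recs, model_key):
--     clean = marg = sev = 0
--     for r in recs:
--         s = r[model_key]
--         mx = s["max_se_infer"]
--         if mx < SE_WARN: clean += 1
--         elif mx < SE_SEVERE: marg += 1
--         else: sev += 1
--     return clean, marg, sev
-- ===== SOURCE B (Python) =====
-- import bisect
--
-- SE_WARN = 5      # noticeable instability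
--
-- SE_SEVERE = 100  # coefficient essentially unidentified
--
-- def count_by_sev(recs, model_key):
--     # Sort all max_se_infer values once, then the three buckets are the
--     # segments delimited by the two threshold positions (binary search).
--     mxs = sorted(r[model_key]["max_se_infer"] for r in recs)
--     c_warn = bisect.bisect_left(mxs, SE_WARN)    # values strictly below SE_WARN
--     c_sev = bisect.bisect_left(mxs, SE_SEVERE)   # values strictly below SE_SEVERE
--     return c_warn, c_sev - c_warn, len(mxs) - c_sev
-- ===== Notes on version B (the rewrite author's own statement) =====
-- stated objective: alternative
-- what changed: Replaces the per-record if/elif comparison ladder by a global strategy: extract and sort all max_se_infer values once, then obtain the three bucket sizes as the segments delimited by two binary searches (bisect_left) for the thresholds.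
import Mathlib
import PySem

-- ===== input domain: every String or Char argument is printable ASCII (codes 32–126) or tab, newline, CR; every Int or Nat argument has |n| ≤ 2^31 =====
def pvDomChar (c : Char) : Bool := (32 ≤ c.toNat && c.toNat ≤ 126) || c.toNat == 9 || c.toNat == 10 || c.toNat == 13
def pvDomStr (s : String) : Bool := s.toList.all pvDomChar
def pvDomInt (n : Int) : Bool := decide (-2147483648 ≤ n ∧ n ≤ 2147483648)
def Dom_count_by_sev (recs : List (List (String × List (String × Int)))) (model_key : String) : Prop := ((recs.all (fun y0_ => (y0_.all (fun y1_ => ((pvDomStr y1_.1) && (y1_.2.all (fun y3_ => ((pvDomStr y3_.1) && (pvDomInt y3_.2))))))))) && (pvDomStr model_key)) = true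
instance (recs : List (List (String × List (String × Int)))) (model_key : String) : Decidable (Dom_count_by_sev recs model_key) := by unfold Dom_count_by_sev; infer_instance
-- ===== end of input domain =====

-- B replaces the per-record if/elif ladder by a global sort of all max_se_infer values
-- followed by two binary searches for the thresholds; genuinely different algorithm, not faster.

-- shared dict primitive: Python d[k] on an association list (first match; none = KeyError)
def pyLookup {α : Type} (d : List (String × α)) (k : String) : Option α :=
  match d with
  | [] => none
  | (k', v) :: rest => if k' == k then some v else pyLookup rest k

-- ===== PORT A =====
-- step of A's loop body (one record)
def stepA (model_key : String) (acc : Int × Int × Int) (r : List (String × List (String × Int))) : Int × Int × Int :=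
  match pyLookup r model_key with
  | none => acc   -- Python raises KeyError here; excluded by Pre_
  | some s =>
    match pyLookup s "max_se_infer" with
    | none => acc -- Python raises KeyError here; excluded by Pre_
    | some mx =>
      if mx < 5 then (acc.1 + 1, acc.2.1, acc.2.2)
      else if mx < 100 then (acc.1, acc.2.1 + 1, acc.2.2)
      else (acc.1, acc.2.1, acc.2.2 + 1)

def count_by_sev (recs : List (List (String × List (String × Int)))) (model_key : String) : Int × Int × Int :=
  recs.foldl (stepA model_key) (0, 0, 0)

-- ===== PORT B =====
-- r[model_key]["max_se_infer"] (none = KeyError; excluded by Pre_)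
def extractMx (model_key : String) (r : List (String × List (String × Int))) : Option Int :=
  (pyLookup r model_key).bind (fun s => pyLookup s "max_se_infer")

def count_by_sev_alt (recs : List (List (String × List (String × Int)))) (model_key : String) : Int × Int × Int :=
  let mxs := PySem.List.sorted (recs.filterMap (extractMx model_key)) (fun x => x) false
  let cWarn : Int := PySem.List.bisectLeft mxs 5
  let cSev : Int := PySem.List.bisectLeft mxs 100
  (cWarn, cSev - cWarn, (mxs.length : Int) - cSev)

-- ===== PRECONDITION & SPEC =====
-- Pre_: every record has the model_key, and that sub-dict has "max_se_infer" (else Python raises KeyError)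
def Pre_count_by_sev (recs : List (List (String × List (String × Int)))) (model_key : String) : Prop :=
  ∀ r ∈ recs, (∃ p ∈ r, p.1 = model_key) ∧
    (∀ p ∈ r, p.1 = model_key → ∃ q ∈ p.2, q.1 = "max_se_infer")
instance (recs : List (List (String × List (String × Int)))) (model_key : String) : Decidable (Pre_count_by_sev recs model_key) := by unfold Pre_count_by_sev; infer_instance

def pvWitness_count_by_sev : (List (List (String × List (String × Int)))) × String :=
  ([[("m", [("max_se_infer", 3)])], [("m", [("max_se_infer", 150)])]], "m")

def Spec_count_by_sev (recs : List (List (String × List (String × Int)))) (model_key : String) (out : Int × Int × Int) : Prop := out = count_by_sev_alt recs model_key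
instance (recs : List (List (String × List (String × Int)))) (model_key : String) (out : Int × Int × Int) : Decidable (Spec_count_by_sev recs model_key out) := by unfold Spec_count_by_sev; infer_instance

-- ===== CLAIM (what is proved, stated in full; the proofs are below) =====
def Claim_equal_count_by_sev : Prop := ∀ (recs : List (List (String × List (String × Int)))) (model_key : String), Dom_count_by_sev recs model_key → Pre_count_by_sev recs model_key → Spec_count_by_sev recs model_key (count_by_sev recs model_key)

-- ===== LEMMAS AND PROOFS =====

-- the three bucket predicates on an extracted value
def pLow (mx : Int) : Bool := mx < 5
def pMid (mx : Int) : Bool := decide (5 ≤ mx ∧ mx < 100)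
def pHigh (mx : Int) : Bool := 100 ≤ mx

-- stepA through the extraction helper
lemma stepA_extract (mk : String) (acc : Int × Int × Int) (r : List (String × List (String × Int))) :
    stepA mk acc r = match extractMx mk r with
      | none => acc
      | some mx =>
        if mx < 5 then (acc.1 + 1, acc.2.1, acc.2.2)
        else if mx < 100 then (acc.1, acc.2.1 + 1, acc.2.2)
        else (acc.1, acc.2.1, acc.2.2 + 1) := by
  unfold stepA extractMx
  cases pyLookup r mk with
  | none => rfl
  | some sd => cases pyLookup sd "max_se_infer" <;> rfl

-- A's fold counts the three predicates over the successfully extracted values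
lemma foldA_counts (model_key : String) :
    ∀ (recs : List (List (String × List (String × Int)))) (c m s : Int),
    recs.foldl (stepA model_key) (c, m, s)
    = (c + ((recs.filterMap (extractMx model_key)).countP pLow : Int),
       m + ((recs.filterMap (extractMx model_key)).countP pMid : Int),
       s + ((recs.filterMap (extractMx model_key)).countP pHigh : Int)) := by
  intro recs
  induction recs with
  | nil => intro c m s; simp
  | cons r rest ih =>
    intro c m s
    simp only [List.foldl_cons, List.filterMap_cons, stepA_extract]
    cases h1 : extractMx model_key r with
    | none => simp only [h1, ih]
    | some mx =>
      simp only [h1]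
      by_cases hw : mx < 5
      · rw [if_pos hw, ih]
        refine Prod.ext ?_ (Prod.ext ?_ ?_) <;>
          simp [List.countP_cons, pLow, pMid, pHigh, hw,
            show ¬(5 ≤ mx) by omega, show ¬(100 ≤ mx) by omega] <;>
          push_cast <;> ring
      · by_cases hs : mx < 100
        · rw [if_neg hw, if_pos hs, ih]
          refine Prod.ext ?_ (Prod.ext ?_ ?_) <;>
            simp [List.countP_cons, pLow, pMid, pHigh, hw,
              show (5 ≤ mx ∧ mx < 100) by omega, show ¬(100 ≤ mx) by omega] <;>
            push_cast <;> ring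
        · rw [if_neg hw, if_neg hs, ih]
          refine Prod.ext ?_ (Prod.ext ?_ ?_) <;>
            simp [List.countP_cons, pLow, pMid, pHigh, hw,
              show ¬(5 ≤ mx ∧ mx < 100) by omega, show (100 ≤ mx) by omega] <;>
            push_cast <;> ring

-- bisect_left on a nondecreasing list is the number of elements strictly below x
lemma bisectLeft_eq_countP (xs : List Int) (x : Int)
    (h : xs.Pairwise (fun a b => a ≤ b)) :
    PySem.List.bisectLeft xs x = xs.countP (fun v => v < x) := by
  obtain ⟨hle, hlt, hge⟩ := PySem.List.bisectLeft_spec xs x h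
  set k := PySem.List.bisectLeft xs x with hk
  have hsplit : xs = xs.take k ++ xs.drop k := (List.take_append_drop k xs).symm
  have htake : (xs.take k).countP (fun v => v < x) = k := by
    have hall : ∀ v ∈ xs.take k, (fun v => decide (v < x)) v = true := by
      intro v hv
      obtain ⟨j, hj, rfl⟩ := List.mem_iff_getElem.mp hv
      have hjk : j < k := lt_of_lt_of_le hj (by simp)
      have hjlen : j < xs.length := lt_of_lt_of_le hjk hle
      have : (xs.take k)[j] = xs[j] := List.getElem_take
      rw [this]
      simpa using hlt j hjlen hjk
    rw [List.countP_eq_length.mpr hall, List.length_take]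
    omega
  have hdrop : (xs.drop k).countP (fun v => v < x) = 0 := by
    rw [List.countP_eq_zero]
    intro v hv
    obtain ⟨j, hj, rfl⟩ := List.mem_iff_getElem.mp hv
    have hjlen : k + j < xs.length := by
      have := hj; simp [List.length_drop] at this; omega
    have : (xs.drop k)[j] = xs[k + j] := List.getElem_drop
    rw [this]
    simpa using not_lt.mpr (hge (k + j) hjlen (by omega))
  calc k = (xs.take k).countP (fun v => v < x) + (xs.drop k).countP (fun v => v < x) := by
            rw [htake, hdrop]; omega
       _ = xs.countP (fun v => v < x) := by rw [← List.countP_append, ← hsplit]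
  
-- counting arithmetic: the three buckets from the two strict-below counts
lemma count_split (l : List Int) :
    l.countP (fun v => v < 100) = l.countP pLow + l.countP pMid ∧
    l.length = l.countP (fun v => v < 100) + l.countP pHigh := by
  induction l with
  | nil => simp
  | cons a t ih =>
    obtain ⟨ih1, ih2⟩ := ih
    simp only [List.countP_cons, List.length_cons, pLow, pMid, pHigh]
    by_cases h1 : a < 5 <;> by_cases h2 : a < 100
    · constructor <;> simp [h1, h2, show ¬(5 ≤ a) by omega,
        show ¬(100 ≤ a) by omega, ih1, ih2] <;> omega
    · exact absurd (by omega : a < 100) h2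
    · constructor <;> simp [h1, h2, show (5 ≤ a ∧ a < 100) by omega,
        show ¬(100 ≤ a) by omega, ih1, ih2] <;> omega
    · constructor <;> simp [h1, h2, show ¬(5 ≤ a ∧ a < 100) by omega,
        show (100 ≤ a) by omega, ih1, ih2] <;> omega

-- ===== VERDICT (by name: the statement is the Claim_ definition above) =====
theorem count_by_sev_spec : Claim_equal_count_by_sev := by
  intro recs model_key _ _
  unfold Spec_count_by_sev count_by_sev count_by_sev_alt
  set g := recs.filterMap (extractMx model_key) with hg
  set mxs := PySem.List.sorted g (fun x => x) false with hm
  have hpair : mxs.Pairwise (fun a b => a ≤ b) := by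
    simpa using PySem.List.sorted_pairwise g (fun x => x)
  have hperm : mxs.Perm g := PySem.List.sorted_perm g (fun x => x) false
  rw [foldA_counts, ← hg]
  have hc5 : PySem.List.bisectLeft mxs 5 = g.countP pLow := by
    rw [bisectLeft_eq_countP mxs 5 hpair, hperm.countP_eq]; rfl
  have hc100 : PySem.List.bisectLeft mxs 100 = g.countP (fun v => v < 100) := by
    rw [bisectLeft_eq_countP mxs 100 hpair, hperm.countP_eq]
  obtain ⟨hsplit, hlen⟩ := count_split g
  have hlenm : mxs.length = g.length := hperm.length_eq
  simp only [hc5, hc100, hlenm]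
  refine Prod.ext (by simp) (Prod.ext ?_ ?_) <;> simp only []
  · rw [hsplit]; push_cast; ring
  · rw [hlen, hsplit]; push_cast; ring
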